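-- pv_equiv track=rewrite | github.com/p3rc1va1/open-transcribe | src/model_selector.py | _sort_by_tier
-- ===== SOURCE A (Python) =====
-- MODEL_TIER_ORDER = [
--     "gemini-3-pro",
--     "gemini-3-flash",
--     "gemini-2.5-pro",
--     "gemini-2.5-flash",
--     "gemini-2.0-flash",
-- ]
--
-- def _sort_by_tier(model_names: list[str]) -> list[str]:
--     """Sort model names according to MODEL_TIER_ORDER.
--
--     Models matching an earlier prefix rank higher.
--     Models not matching any prefix are excluded.
--     """
--     def tier_key(name: str) -> tuple[int, str]:
--         for i, prefix in enumerate(MODEL_TIER_ORDER):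
--             if name.startswith(prefix):
--                 return (i, name)
--         return (len(MODEL_TIER_ORDER), name)
--
--     ranked = sorted(model_names, key=tier_key)
--     # Exclude models that don't match any tier prefix
--     return [n for n in ranked if any(n.startswith(p) for p in MODEL_TIER_ORDER)]
-- ===== SOURCE B (Python) =====
-- MODEL_TIER_ORDER = [
--     "gemini-3-pro",
--     "gemini-3-flash",
--     "gemini-2.5-pro",
--     "gemini-2.5-flash",
--     "gemini-2.0-flash",
-- ]
--
-- def _sort_by_tier(model_names: list[str]) -> list[str]:
--     """Concatenate per-tier buckets, each sorted alphabetically."""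
--     result = []
--     for prefix in MODEL_TIER_ORDER:
--         bucket = [n for n in model_names if n.startswith(prefix)]
--         bucket.sort()
--         result.extend(bucket)
--     return result
-- ===== Notes on version B (the rewrite author's own statement) =====
-- stated objective: simpler
-- what changed: Replaces the composite-key sort (tier index, name) followed by an any-prefix membership filter with a loop over MODEL_TIER_ORDER that collects, sorts and concatenates one bucket per tier prefix; non-matching names are simply never collected.
import Mathlib
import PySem

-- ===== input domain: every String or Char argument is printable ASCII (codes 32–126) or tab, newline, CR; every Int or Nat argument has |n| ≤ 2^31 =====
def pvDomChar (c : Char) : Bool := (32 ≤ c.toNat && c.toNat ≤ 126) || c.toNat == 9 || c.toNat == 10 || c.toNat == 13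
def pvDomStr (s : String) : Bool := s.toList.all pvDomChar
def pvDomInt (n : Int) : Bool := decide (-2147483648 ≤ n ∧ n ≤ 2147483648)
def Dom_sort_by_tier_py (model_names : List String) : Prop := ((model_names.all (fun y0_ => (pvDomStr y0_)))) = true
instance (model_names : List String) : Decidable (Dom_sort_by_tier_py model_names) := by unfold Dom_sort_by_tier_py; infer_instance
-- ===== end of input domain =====

-- B replaces the composite-key sort + filter by per-tier buckets, each sorted and concatenated (objective: simpler).

-- ===== PORT A =====
def pvTierOrder : List String :=
  ["gemini-3-pro", "gemini-3-flash", "gemini-2.5-pro", "gemini-2.5-flash", "gemini-2.0-flash"]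

-- the 'for i, prefix in enumerate(pvTierOrder)' loop of tier_key
def tierGo (name : String) : List (Int × String) → Int × String
  | [] => ((pvTierOrder.length : Int), name)
  | (i, p) :: rest => if PySem.Str.startswith name p then (i, name) else tierGo name rest

def tier_key (name : String) : Int × String :=
  tierGo name (PySem.List.enumerate pvTierOrder)

def sort_by_tier_py (model_names : List String) : List String :=
  let ranked := PySem.List.sorted2 model_names (fun n => (tier_key n).1) (fun n => (tier_key n).2)
  ranked.filter (fun n => pvTierOrder.any (fun p => PySem.Str.startswith n p))

-- ===== PORT B =====
def sort_by_tier_py_alt (model_names : List String) : List String :=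
  pvTierOrder.foldl
    (fun result pfx =>
      result ++ PySem.List.sorted (model_names.filter (fun n => PySem.Str.startswith n pfx)) (fun x => x))
    []

-- ===== PRECONDITION & SPEC =====
def Spec_sort_by_tier_py (model_names : List String) (out : List String) : Prop := out = sort_by_tier_py_alt model_names
instance (model_names : List String) (out : List String) : Decidable (Spec_sort_by_tier_py model_names out) := by unfold Spec_sort_by_tier_py; infer_instance

-- ===== CLAIM (what is proved, stated in full; the proofs are below) =====
def Claim_equal_sort_by_tier_py : Prop := ∀ (model_names : List String), Dom_sort_by_tier_py model_names → Spec_sort_by_tier_py model_names (sort_by_tier_py model_names)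

-- ===== LEMMAS AND PROOFS =====

-- the lexicographic key A sorts by
def pvK (n : String) : Int ×ₗ String := toLex ((tier_key n).1, n)

theorem pvK_inj : Function.Injective pvK := by
  intro a b h
  unfold pvK at h
  have := congrArg (fun x => (ofLex x).2) h
  simpa using this

-- a string cannot match two incomparable prefixes
theorem pv_excl {p q : String} (hpq : ¬ (p.toList <+: q.toList)) (hqp : ¬ (q.toList <+: p.toList))
    {n : String} (hp : PySem.Str.startswith n p = true) : PySem.Str.startswith n q = false := by
  by_contra h
  have hq : PySem.Str.startswith n q = true := by
    cases hh : PySem.Str.startswith n q with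
    | false => exact absurd hh h
    | true => rfl
  rw [PySem.Str.startswith_eq, PySem.Chars.startswith_iff] at hp hq
  rcases List.prefix_or_prefix_of_prefix hp hq with h1 | h1
  · exact hpq h1
  · exact hqp h1

-- no tier prefix is a prefix of a different one
theorem pv_pairs : ∀ p ∈ pvTierOrder, ∀ q ∈ pvTierOrder, p ≠ q → ¬ (p.toList <+: q.toList) := by decide

theorem pv_disj : ∀ (n p q : String), p ∈ pvTierOrder → q ∈ pvTierOrder →
    PySem.Str.startswith n p = true → PySem.Str.startswith n q = true → p = q := by
  intro n p q hp hq h1 h2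
  by_contra hne
  have h3 := pv_excl (pv_pairs p hp q hq hne) (pv_pairs q hq p hp (Ne.symm hne)) h1
  rw [h2] at h3
  exact Bool.true_eq_false.mp h3

theorem pv_tier_snd (n : String) : (tier_key n).2 = n := by
  unfold tier_key
  generalize PySem.List.enumerate pvTierOrder = L
  induction L with
  | nil => rfl
  | cons x rest ih =>
    obtain ⟨i, p⟩ := x
    simp only [tierGo]
    split
    · rfl
    · exact ih

theorem pv_enum : PySem.List.enumerate pvTierOrder =
    [((0 : Int), "gemini-3-pro"), (1, "gemini-3-flash"), (2, "gemini-2.5-pro"),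
     (3, "gemini-2.5-flash"), (4, "gemini-2.0-flash")] := by decide

-- the tier index of a string matching the i-th prefix is i
theorem pv_tier_eq (n p : String) (i : Nat) (hi : i < pvTierOrder.length)
    (hp : pvTierOrder[i] = p) (h : PySem.Str.startswith n p = true) :
    (tier_key n).1 = (i : Int) := by
  have hmem : p ∈ pvTierOrder := hp ▸ List.getElem_mem hi
  have hfalse : ∀ q ∈ pvTierOrder, q ≠ p → PySem.Str.startswith n q = false := by
    intro q hq hne
    exact pv_excl (pv_pairs p hmem q hq (Ne.symm hne)) (pv_pairs q hq p hmem hne) h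
  unfold tier_key
  rw [pv_enum]
  have hi5 : i < 5 := by simpa [pvTierOrder] using hi
  have hcases : i = 0 ∨ i = 1 ∨ i = 2 ∨ i = 3 ∨ i = 4 := by omega
  rcases hcases with rfl | rfl | rfl | rfl | rfl
  · have hp' : p = "gemini-3-pro" := by simpa [pvTierOrder] using hp.symm
    subst hp'
    simp [PySem.Str.startswith_eq] at h
    simp [tierGo, h]
  · have hp' : p = "gemini-3-flash" := by simpa [pvTierOrder] using hp.symm
    subst hp'
    have f0 := hfalse "gemini-3-pro" (by simp [pvTierOrder]) (by decide)
    simp [PySem.Str.startswith_eq] at h f0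
    simp [tierGo, h, f0]
  · have hp' : p = "gemini-2.5-pro" := by simpa [pvTierOrder] using hp.symm
    subst hp'
    have f0 := hfalse "gemini-3-pro" (by simp [pvTierOrder]) (by decide)
    have f1 := hfalse "gemini-3-flash" (by simp [pvTierOrder]) (by decide)
    simp [PySem.Str.startswith_eq] at h f0 f1
    simp [tierGo, h, f0, f1]
  · have hp' : p = "gemini-2.5-flash" := by simpa [pvTierOrder] using hp.symm
    subst hp'
    have f0 := hfalse "gemini-3-pro" (by simp [pvTierOrder]) (by decide)
    have f1 := hfalse "gemini-3-flash" (by simp [pvTierOrder]) (by decide)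
    have f2 := hfalse "gemini-2.5-pro" (by simp [pvTierOrder]) (by decide)
    simp [PySem.Str.startswith_eq] at h f0 f1 f2
    simp [tierGo, h, f0, f1, f2]
  · have hp' : p = "gemini-2.0-flash" := by simpa [pvTierOrder] using hp.symm
    subst hp'
    have f0 := hfalse "gemini-3-pro" (by simp [pvTierOrder]) (by decide)
    have f1 := hfalse "gemini-3-flash" (by simp [pvTierOrder]) (by decide)
    have f2 := hfalse "gemini-2.5-pro" (by simp [pvTierOrder]) (by decide)
    have f3 := hfalse "gemini-2.5-flash" (by simp [pvTierOrder]) (by decide)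
    simp [PySem.Str.startswith_eq] at h f0 f1 f2 f3
    simp [tierGo, h, f0, f1, f2, f3]

-- filter by a disjunction splits into two filters, up to permutation
theorem pv_filter_or_perm {α : Type} (q r : α → Bool) (l : List α)
    (h : ∀ x ∈ l, ¬(q x = true ∧ r x = true)) :
    (l.filter (fun x => q x || r x)).Perm (l.filter q ++ l.filter r) := by
  induction l with
  | nil => simp
  | cons x t ih =>
    have ht := ih (fun y hy => h y (List.mem_cons_of_mem _ hy))
    by_cases hq : q x = true
    · have hr : r x = false := by
        rcases hrx : r x with _ | _
        · rfl
        · exact absurd ⟨hq, hrx⟩ (h x (List.mem_cons_self))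
      simpa [List.filter_cons, hq, hr] using ht.cons x
    · by_cases hr : r x = true
      · simp only [List.filter_cons, hq, hr]
        simp only [Bool.false_or, if_true]
        exact (ht.cons x).trans List.perm_middle.symm
      · simp only [Bool.not_eq_true] at hq hr
        simpa [List.filter_cons, hq, hr] using ht

-- filtering by "matches some prefix in P" splits into per-prefix buckets
theorem pv_bucket_perm (l : List String) : ∀ (P : List String), P.Nodup →
    (∀ n p q, p ∈ P → q ∈ P → PySem.Str.startswith n p = true → PySem.Str.startswith n q = true → p = q) →
    (l.filter (fun n => P.any (fun p => PySem.Str.startswith n p))).Perm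
      (P.flatMap (fun p => l.filter (fun n => PySem.Str.startswith n p)))
  | [], _, _ => by simp
  | p :: P', hnd, hd => by
    have hdisj : ∀ x ∈ l, ¬(PySem.Str.startswith x p = true ∧ (P'.any (fun q => PySem.Str.startswith x q)) = true) := by
      rintro x _ ⟨h1, h2⟩
      obtain ⟨q, hq, hsw⟩ := List.any_eq_true.mp h2
      have : p = q := hd x p q List.mem_cons_self (List.mem_cons_of_mem _ hq) h1 hsw
      exact (List.nodup_cons.mp hnd).1 (this ▸ hq)
    have step := pv_filter_or_perm (fun n => PySem.Str.startswith n p)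
      (fun n => P'.any (fun q => PySem.Str.startswith n q)) l hdisj
    have ih := pv_bucket_perm l P' (List.nodup_cons.mp hnd).2
      (fun n a b ha hb => hd n a b (List.mem_cons_of_mem _ ha) (List.mem_cons_of_mem _ hb))
    have heq : l.filter (fun n => (p :: P').any (fun q => PySem.Str.startswith n q))
        = l.filter (fun n => PySem.Str.startswith n p || P'.any (fun q => PySem.Str.startswith n q)) := by
      simp [List.any_cons]
    rw [heq, List.flatMap_cons]
    exact step.trans (List.Perm.append_left _ ih)

-- sorted2 with keys k1, k2 is sorted with the lexicographic key
theorem pv_sorted2_eq {α κ₁ κ₂ : Type} [LinearOrder κ₁] [LinearOrder κ₂]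
    (xs : List α) (k1 : α → κ₁) (k2 : α → κ₂) :
    PySem.List.sorted2 xs k1 k2 = PySem.List.sorted xs (fun x => toLex (k1 x, k2 x)) := by
  rw [PySem.List.sorted_eq_foldl_insertBy]
  unfold PySem.List.sorted2
  simp only [if_neg (by simp : ¬ (false = true))]
  have hfun : (fun (a b : α) => decide (k1 a < k1 b) || (!decide (k1 b < k1 a) && decide (k2 a < k2 b)))
      = (fun a b => decide (toLex (k1 a, k2 a) < toLex (k1 b, k2 b))) := by
    funext a b
    rcases lt_trichotomy (k1 a) (k1 b) with h | h | h
    · simp [h, Prod.Lex.toLex_lt_toLex, not_lt.mpr h.le]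
    · simp [h, Prod.Lex.toLex_lt_toLex]
    · simp [not_lt.mpr h.le, h, Prod.Lex.toLex_lt_toLex, (ne_of_gt h)]
  rw [hfun]

-- all elements of the i-th sorted bucket have tier index i
theorem pv_bucket_tier (l : List String) (p : String) (i : Nat) (hi : i < pvTierOrder.length)
    (hp : pvTierOrder[i] = p) :
    ∀ a ∈ PySem.List.sorted (l.filter (fun n => PySem.Str.startswith n p)) (fun x => x),
      (tier_key a).1 = (i : Int) := by
  intro a ha
  rw [PySem.List.mem_sorted] at ha
  exact pv_tier_eq a p i hi hp (List.mem_filter.mp ha).2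

-- a sorted bucket is pairwise ≤ under the lex key
theorem pv_pw_bucket (l : List String) (p : String) (i : Nat) (hi : i < pvTierOrder.length)
    (hp : pvTierOrder[i] = p) :
    List.Pairwise (fun a b => pvK a ≤ pvK b)
      (PySem.List.sorted (l.filter (fun n => PySem.Str.startswith n p)) (fun x => x)) := by
  have hpw := PySem.List.sorted_pairwise (l.filter (fun n => PySem.Str.startswith n p)) (fun x => x)
  refine hpw.imp_of_mem ?_
  intro a b ha hb hab
  have ia := pv_bucket_tier l p i hi hp a ha
  have ib := pv_bucket_tier l p i hi hp b hb
  unfold pvK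
  rw [Prod.Lex.toLex_le_toLex]
  exact Or.inr ⟨by rw [ia, ib], hab⟩

-- ===== VERDICT (by name: the statement is the Claim_ definition above) =====
theorem sort_by_tier_py_spec : Claim_equal_sort_by_tier_py := by
  intro l _
  unfold Spec_sort_by_tier_py
  -- abbreviations for the five sorted buckets
  set s0 := PySem.List.sorted (l.filter (fun n => PySem.Str.startswith n "gemini-3-pro")) (fun x => x) with hs0
  set s1 := PySem.List.sorted (l.filter (fun n => PySem.Str.startswith n "gemini-3-flash")) (fun x => x) with hs1
  set s2 := PySem.List.sorted (l.filter (fun n => PySem.Str.startswith n "gemini-2.5-pro")) (fun x => x) with hs2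
  set s3 := PySem.List.sorted (l.filter (fun n => PySem.Str.startswith n "gemini-2.5-flash")) (fun x => x) with hs3
  set s4 := PySem.List.sorted (l.filter (fun n => PySem.Str.startswith n "gemini-2.0-flash")) (fun x => x) with hs4
  have hB : sort_by_tier_py_alt l = s0 ++ (s1 ++ (s2 ++ (s3 ++ s4))) := by
    simp [sort_by_tier_py_alt, pvTierOrder, List.foldl, List.append_assoc, hs0, hs1, hs2, hs3, hs4]
  -- A's result, rewritten as a filter of a single-lex-key sort
  have hA : sort_by_tier_py l =
      (PySem.List.sorted l pvK).filter (fun n => pvTierOrder.any (fun p => PySem.Str.startswith n p)) := by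
    show (PySem.List.sorted2 l (fun n => (tier_key n).1) (fun n => (tier_key n).2)).filter _ = _
    rw [pv_sorted2_eq]
    have hkey : (fun n => toLex ((tier_key n).1, (tier_key n).2)) = pvK := by
      funext n
      simp [pvK, pv_tier_snd n]
    rw [hkey]
  -- the two sides are permutations of each other
  have hpermA : (sort_by_tier_py l).Perm
      (l.filter (fun n => pvTierOrder.any (fun p => PySem.Str.startswith n p))) := by
    rw [hA]
    exact List.Perm.filter _ (PySem.List.sorted_perm l pvK _)
  have hpermBuckets := pv_bucket_perm l pvTierOrder (by decide) pv_disj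
  have hflat : pvTierOrder.flatMap (fun p => l.filter (fun n => PySem.Str.startswith n p)) =
      (l.filter (fun n => PySem.Str.startswith n "gemini-3-pro")) ++
      ((l.filter (fun n => PySem.Str.startswith n "gemini-3-flash")) ++
      ((l.filter (fun n => PySem.Str.startswith n "gemini-2.5-pro")) ++
      ((l.filter (fun n => PySem.Str.startswith n "gemini-2.5-flash")) ++
      (l.filter (fun n => PySem.Str.startswith n "gemini-2.0-flash"))))) := by
    show List.flatMap _ ["gemini-3-pro", "gemini-3-flash", "gemini-2.5-pro", "gemini-2.5-flash", "gemini-2.0-flash"] = _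
    simp [List.flatMap_cons, List.flatMap_nil]
  have hpermB : (sort_by_tier_py_alt l).Perm
      (l.filter (fun n => pvTierOrder.any (fun p => PySem.Str.startswith n p))) := by
    rw [hB]
    refine List.Perm.trans ?_ (hpermBuckets.symm)
    rw [hflat]
    exact ((PySem.List.sorted_perm _ _ _).append
      ((PySem.List.sorted_perm _ _ _).append
        ((PySem.List.sorted_perm _ _ _).append
          ((PySem.List.sorted_perm _ _ _).append (PySem.List.sorted_perm _ _ _)))))
  -- pairwise order on A's side
  have hpwA : List.Pairwise (fun a b => pvK a ≤ pvK b) (sort_by_tier_py l) := by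
    rw [hA]
    exact List.Pairwise.sublist (List.filter_sublist) (PySem.List.sorted_pairwise l pvK)
  -- pairwise order on B's side
  have tier0 := pv_bucket_tier l "gemini-3-pro" 0 (by decide) rfl
  have tier1 := pv_bucket_tier l "gemini-3-flash" 1 (by decide) rfl
  have tier2 := pv_bucket_tier l "gemini-2.5-pro" 2 (by decide) rfl
  have tier3 := pv_bucket_tier l "gemini-2.5-flash" 3 (by decide) rfl
  have tier4 := pv_bucket_tier l "gemini-2.0-flash" 4 (by decide) rfl
  have cross : ∀ (a b : String), (tier_key a).1 < (tier_key b).1 → pvK a ≤ pvK b := by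
    intro a b h
    unfold pvK
    rw [Prod.Lex.toLex_le_toLex]
    exact Or.inl h
  have hpwB : List.Pairwise (fun a b => pvK a ≤ pvK b) (sort_by_tier_py_alt l) := by
    rw [hB]
    refine List.pairwise_append.mpr ⟨pv_pw_bucket l _ 0 (by decide) rfl, ?_, ?_⟩
    · refine List.pairwise_append.mpr ⟨pv_pw_bucket l _ 1 (by decide) rfl, ?_, ?_⟩
      · refine List.pairwise_append.mpr ⟨pv_pw_bucket l _ 2 (by decide) rfl, ?_, ?_⟩
        · refine List.pairwise_append.mpr ⟨pv_pw_bucket l _ 3 (by decide) rfl, pv_pw_bucket l _ 4 (by decide) rfl, ?_⟩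
          · intro a ha b hb
            exact cross a b (by rw [tier3 a ha, tier4 b hb]; norm_num)
        · intro a ha b hb
          rcases List.mem_append.mp hb with hb | hb
          · exact cross a b (by rw [tier2 a ha, tier3 b hb]; norm_num)
          · exact cross a b (by rw [tier2 a ha, tier4 b hb]; norm_num)
      · intro a ha b hb
        rcases List.mem_append.mp hb with hb | hb
        · exact cross a b (by rw [tier1 a ha, tier2 b hb]; norm_num)
        · rcases List.mem_append.mp hb with hb | hb
          · exact cross a b (by rw [tier1 a ha, tier3 b hb]; norm_num)
          · exact cross a b (by rw [tier1 a ha, tier4 b hb]; norm_num)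
    · intro a ha b hb
      rcases List.mem_append.mp hb with hb | hb
      · exact cross a b (by rw [tier0 a ha, tier1 b hb]; norm_num)
      · rcases List.mem_append.mp hb with hb | hb
        · exact cross a b (by rw [tier0 a ha, tier2 b hb]; norm_num)
        · rcases List.mem_append.mp hb with hb | hb
          · exact cross a b (by rw [tier0 a ha, tier3 b hb]; norm_num)
          · exact cross a b (by rw [tier0 a ha, tier4 b hb]; norm_num)
  exact PySem.List.eq_of_perm_of_pairwise_le_of_injective pvK pvK_inj
    (hpermA.trans hpermB.symm) hpwA hpwB
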